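-- pv_equiv track=rewrite | github.com/carmit246/opsschool5-coding | age_to_bucket_parser.py | create_buckets
-- ===== SOURCE A (Python) =====
-- def create_buckets(buckets, minimum, maximum):  # Calculate age ranges and return buckets dictionary with ranges keys
--     t = {}
--     for bucket_age in buckets:
--         age_range = (minimum, bucket_age)
--         t[age_range] = []
--         minimum = bucket_age+1
--     #last_range = str(buckets[-1]+1) + "-" + str(maximum)
--     last_range = (buckets[-1] + 1, maximum)
--     t[last_range] = []
--     result = dict(t)
--     return result
-- ===== SOURCE B (Python) =====
-- def create_buckets(buckets, minimum, maximum):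
--     # Build the key list back-to-front: consume the boundaries from the right,
--     # threading the current UPPER bound, then reverse the keys into the dict.
--     rev = []
--     rest = list(buckets)
--     upper = maximum
--     while rest:
--         b = rest.pop()
--         rev.append((b + 1, upper))
--         upper = b
--     rev.append((minimum, upper))
--     return {k: [] for k in reversed(rev)}
-- ===== Notes on version B (the rewrite author's own statement) =====
-- stated objective: alternative
-- what changed: A walks the boundaries left-to-right threading a running lower bound and filling one dict; B builds the key list back-to-front by popping boundaries off the right while threading the upper bound, then reverses the keys into a dict comprehension.
import Mathlib
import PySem

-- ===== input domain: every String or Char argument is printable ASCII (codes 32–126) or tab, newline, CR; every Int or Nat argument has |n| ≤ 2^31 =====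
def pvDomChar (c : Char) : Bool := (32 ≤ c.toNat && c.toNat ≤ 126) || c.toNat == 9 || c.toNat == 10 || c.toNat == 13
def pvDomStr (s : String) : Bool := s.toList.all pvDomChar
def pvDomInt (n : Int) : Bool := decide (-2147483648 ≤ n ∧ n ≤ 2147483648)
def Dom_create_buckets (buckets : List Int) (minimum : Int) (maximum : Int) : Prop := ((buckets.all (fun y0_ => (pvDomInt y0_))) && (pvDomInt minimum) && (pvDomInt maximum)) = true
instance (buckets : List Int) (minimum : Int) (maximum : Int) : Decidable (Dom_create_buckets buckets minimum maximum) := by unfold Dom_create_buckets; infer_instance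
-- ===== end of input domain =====

-- A fills the dict left-to-right threading a running lower bound; B builds the key list
-- back-to-front, popping boundaries off the right while threading the UPPER bound, and
-- reverses the keys into the dict (objective: alternative).

-- ===== PORT A =====
def create_buckets (buckets : List Int) (minimum : Int) (maximum : Int) : List (Int × Int × List Int) :=
  match PySem.List.pyGet? buckets (-1) with
  | none => []   -- buckets[-1] raises IndexError on empty buckets; excluded by Pre_
  | some last =>
    let st := buckets.foldl
      (fun (st : PySem.Dict (Int × Int) (List Int) × Int) bucket_age =>
        (st.1.insert (st.2, bucket_age) [], bucket_age + 1))
      (PySem.Dict.empty, minimum)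
    let t := st.1.insert (last + 1, maximum) []
    t.items.map (fun p => (p.1.1, p.1.2, p.2))

-- ===== PORT B =====
-- the 'while rest: b = rest.pop(); rev.append((b+1, upper)); upper = b' loop:
-- popping from the right = structural recursion over buckets.reverse
def create_buckets_alt_loop : List (Int × Int) → Int → List Int → List (Int × Int) × Int
  | rev, upper, [] => (rev, upper)
  | rev, upper, b :: rest => create_buckets_alt_loop (rev ++ [(b + 1, upper)]) b rest

def create_buckets_alt (buckets : List Int) (minimum : Int) (maximum : Int) : List (Int × Int × List Int) :=
  let st := create_buckets_alt_loop [] maximum buckets.reverse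
  let keys := st.1 ++ [(minimum, st.2)]
  -- {k: [] for k in reversed(rev)}
  (keys.reverse.foldl (fun d k => d.insert k ([] : List Int)) PySem.Dict.empty).items.map
    (fun p => (p.1.1, p.1.2, p.2))

-- ===== PRECONDITION & SPEC =====
-- Pre_ excludes only empty buckets, on which A raises IndexError at buckets[-1]
-- (B's loop would return [(minimum, maximum, [])] there).
def Pre_create_buckets (buckets : List Int) (minimum : Int) (maximum : Int) : Prop :=
  buckets ≠ []
instance (buckets : List Int) (minimum : Int) (maximum : Int) : Decidable (Pre_create_buckets buckets minimum maximum) := by unfold Pre_create_buckets; infer_instance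
def pvWitness_create_buckets : List Int × Int × Int := ([3, 7], 0, 99)

def Spec_create_buckets (buckets : List Int) (minimum : Int) (maximum : Int) (out : List (Int × Int × List Int)) : Prop := out = create_buckets_alt buckets minimum maximum
instance (buckets : List Int) (minimum : Int) (maximum : Int) (out : List (Int × Int × List Int)) : Decidable (Spec_create_buckets buckets minimum maximum out) := by unfold Spec_create_buckets; infer_instance

-- ===== CLAIM (what is proved, stated in full; the proofs are below) =====
def Claim_equal_create_buckets : Prop := ∀ (buckets : List Int) (minimum : Int) (maximum : Int), Dom_create_buckets buckets minimum maximum → Pre_create_buckets buckets minimum maximum → Spec_create_buckets buckets minimum maximum (create_buckets buckets minimum maximum)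

-- ===== LEMMAS AND PROOFS =====

-- the common key sequence (minimum, b1), (b1+1, b2), …, (bn+1, maximum)
def keysSeq (mx : Int) : Int → List Int → List (Int × Int)
  | lo, [] => [(lo, mx)]
  | lo, b :: bs => (lo, b) :: keysSeq mx (b + 1) bs

-- peeling the LAST boundary off keysSeq
lemma keysSeq_append_singleton (bs : List Int) : ∀ (m u b : Int),
    keysSeq u m (bs ++ [b]) = keysSeq b m bs ++ [(b + 1, u)] := by
  induction bs with
  | nil => intro m u b; rfl
  | cons c bs ih =>
    intro m u b
    simp only [List.cons_append, keysSeq, ih]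

-- B's pop loop, then appending the final (minimum, upper) key and reversing,
-- yields exactly keysSeq over the original bucket order
lemma alt_loop_reverse (r : List Int) : ∀ (rev : List (Int × Int)) (u m : Int),
    ((create_buckets_alt_loop rev u r).1 ++ [(m, (create_buckets_alt_loop rev u r).2)]).reverse
      = keysSeq u m r.reverse ++ rev.reverse := by
  induction r with
  | nil => intro rev u m; simp [create_buckets_alt_loop, keysSeq]
  | cons b r ih =>
    intro rev u m
    show ((create_buckets_alt_loop (rev ++ [(b + 1, u)]) b r).1
        ++ [(m, (create_buckets_alt_loop (rev ++ [(b + 1, u)]) b r).2)]).reverse = _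
    rw [ih (rev ++ [(b + 1, u)]) b m]
    simp [List.reverse_cons, keysSeq_append_singleton]

-- A's loop followed by the final insert is the fold of inserts over keysSeq
lemma a_loop_eq_foldl (mx : Int) (bs : List Int) : ∀ (b : Int)
    (d : PySem.Dict (Int × Int) (List Int)) (m : Int),
    (((b :: bs).foldl
        (fun (st : PySem.Dict (Int × Int) (List Int) × Int) x => (st.1.insert (st.2, x) [], x + 1))
        (d, m)).1).insert (bs.getLastD b + 1, mx) []
      = (keysSeq mx m (b :: bs)).foldl (fun d k => d.insert k []) d := by
  induction bs with
  | nil => intro b d m; rfl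
  | cons b' bs ih =>
    intro b d m
    simp only [List.foldl_cons, List.getLastD_cons]
    exact ih b' (d.insert (m, b) []) (b + 1)

-- ===== VERDICT (by name: the statement is the Claim_ definition above) =====
theorem create_buckets_spec : Claim_equal_create_buckets := by
  intro buckets minimum maximum _ hpre
  unfold Spec_create_buckets
  cases buckets with
  | nil => exact absurd rfl hpre
  | cons b bs =>
    unfold create_buckets create_buckets_alt
    simp only [PySem.List.pyGet?_neg_one, List.getLast?_cons, ← List.getLastD_eq_getLast?]
    rw [alt_loop_reverse ((b :: bs).reverse) [] maximum minimum]
    simp only [List.reverse_reverse, List.reverse_nil, List.append_nil]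
    rw [a_loop_eq_foldl]
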